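-- pv_equiv track=rewrite | github.com/iamar7/Mining-and-Summarising-Customer-Review | features_per_sentence.py | cntadj
-- ===== SOURCE A (Python) =====
-- def cntadj(arr):
-- 	tmp = []
-- 	bit = []
-- 	h, w, n = 0, 0, len(arr)
-- 	for i in range(0, n):
-- 		bit.append(0)
-- 		m, w = len(arr[i]), 0
-- 		for j in range(0, m):
-- 			if arr[i][j][1] == "JJ" or arr[i][j][1] == "JJS" or arr[i][j][1] == "JJR":
-- 				if w == 0:
-- 					tmp.append([])
-- 				tmp[h].append(str(arr[i][j][0]))
-- 				w += 1
-- 				bit[i] += 1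
-- 		if w >= 1:
-- 			h += 1
-- 	return tmp, bit
-- ===== SOURCE B (Python) =====
-- def cntadj(arr):
-- 	# Flatten to (sentence-index, token) pairs, group adjectives in a dict keyed by
-- 	# sentence index, then derive both outputs from that index.
-- 	tagged = [(i, t) for i, s in enumerate(arr) for t in s]
-- 	groups = {}
-- 	for i, (word, tag) in tagged:
-- 		if tag in ("JJ", "JJS", "JJR"):
-- 			groups.setdefault(i, []).append(str(word))
-- 	tmp = list(groups.values())
-- 	bit = [len(groups.get(i, [])) for i in range(len(arr))]
-- 	return tmp, bit
-- ===== Notes on version B (the rewrite author's own statement) =====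
-- stated objective: alternative
-- what changed: Replaces A's interleaved loop with manual h/w compaction counters and in-place tmp[h]/bit[i] mutation by flattening to (sentence-index, token) pairs, grouping adjectives into a dict keyed by sentence index, and deriving both outputs from that index afterwards.
import Mathlib
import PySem

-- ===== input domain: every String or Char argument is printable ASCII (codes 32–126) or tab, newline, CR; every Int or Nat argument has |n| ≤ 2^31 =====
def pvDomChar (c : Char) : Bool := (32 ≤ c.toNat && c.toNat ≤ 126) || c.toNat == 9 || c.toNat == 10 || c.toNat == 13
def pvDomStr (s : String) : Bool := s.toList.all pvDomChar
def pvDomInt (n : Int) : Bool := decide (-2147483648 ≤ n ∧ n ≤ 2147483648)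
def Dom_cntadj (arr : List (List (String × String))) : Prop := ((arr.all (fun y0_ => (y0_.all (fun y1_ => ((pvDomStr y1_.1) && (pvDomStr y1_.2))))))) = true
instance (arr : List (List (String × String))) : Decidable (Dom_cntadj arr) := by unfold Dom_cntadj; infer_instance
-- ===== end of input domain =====

-- B replaces A's interleaved loop (manual h/w compaction counters, in-place tmp[h]/bit[i]
-- mutation) by flattening to (sentence-index, token) pairs, grouping adjectives into a dict
-- keyed by sentence index, and deriving both outputs from that index (alternative).

-- ===== PORT A =====
-- tmp[h].append(...) / bit[i] += 1 : in-place update at an index, modelled exactly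
def pyModify {α : Type} : List α → Nat → (α → α) → List α
  | [], _, _ => []
  | x :: xs, 0, f => f x :: xs
  | x :: xs, n + 1, f => x :: pyModify xs n f

-- body of the inner 'for j' loop; `h` and `i` are the outer loop's values
def cntadjInner (h i : Nat) (st : List (List String) × List Int × Nat)
    (t : String × String) : List (List String) × List Int × Nat :=
  match st with
  | (tmp, bit, w) =>
    if t.2 == "JJ" || t.2 == "JJS" || t.2 == "JJR" then
      let tmp := if w == 0 then tmp ++ [([] : List String)] else tmp
      let tmp := pyModify tmp h (fun l => l ++ [t.1])      -- tmp[h].append(str(arr[i][j][0]))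
      let bit := pyModify bit i (fun c => c + 1)           -- bit[i] += 1
      (tmp, bit, w + 1)
    else (tmp, bit, w)

-- body of the outer 'for i in range(0, n)' loop (i ≥ 0, so p.1.toNat is exact)
def cntadjOuter (st : List (List String) × List Int × Nat)
    (p : Int × List (String × String)) : List (List String) × List Int × Nat :=
  match st with
  | (tmp, bit, h) =>
    match (p.2).foldl (cntadjInner h p.1.toNat) (tmp, bit ++ [(0 : Int)], 0) with
    | (tmp, bit, w) => (tmp, bit, if w ≥ 1 then h + 1 else h)

def cntadj (arr : List (List (String × String))) : List (List String) × List Int :=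
  match (PySem.List.enumerate arr 0).foldl cntadjOuter ([], [], 0) with
  | (tmp, bit, _) => (tmp, bit)

-- ===== PORT B =====
def cntadj_alt (arr : List (List (String × String))) : List (List String) × List Int :=
  -- tagged = [(i, t) for i, s in enumerate(arr) for t in s]
  let tagged := (PySem.List.enumerate arr 0).flatMap (fun p => p.2.map (fun t => (p.1, t)))
  -- groups = {}; for i, (word, tag) in tagged: if tag in (...): groups.setdefault(i, []).append(str(word))
  let groups := tagged.foldl (fun g it =>
      if it.2.2 == "JJ" || it.2.2 == "JJS" || it.2.2 == "JJR" then
        g.modify it.1 ([] : List String) (fun v => v ++ [it.2.1])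
      else g) PySem.Dict.empty
  -- tmp = list(groups.values())
  let tmp := groups.values
  -- bit = [len(groups.get(i, [])) for i in range(len(arr))]
  let bit := (PySem.List.pyRange 0 (arr.length : Int) 1).map
      (fun i => ((groups.getD i []).length : Int))
  (tmp, bit)

-- ===== PRECONDITION & SPEC =====
def Spec_cntadj (arr : List (List (String × String))) (out : List (List String) × List Int) : Prop := out = cntadj_alt arr
instance (arr : List (List (String × String))) (out : List (List String) × List Int) : Decidable (Spec_cntadj arr out) := by unfold Spec_cntadj; infer_instance

-- ===== CLAIM (what is proved, stated in full; the proofs are below) =====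
def Claim_equal_cntadj : Prop := ∀ (arr : List (List (String × String))), Dom_cntadj arr → Spec_cntadj arr (cntadj arr)

-- ===== LEMMAS AND PROOFS =====

-- the per-sentence adjective list (the canonical table both sides are reduced to)
def adjOf (s : List (String × String)) : List String :=
  (s.filter (fun t => t.2 == "JJ" || t.2 == "JJS" || t.2 == "JJR")).map (fun t => t.1)

-- ---------- A-side ----------
theorem pyModify_append {α : Type} (xs : List α) (a : α) (f : α → α) :
    pyModify (xs ++ [a]) xs.length f = xs ++ [f a] := by
  induction xs with
  | nil => rfl
  | cons x xs ih => simp [pyModify, ih]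

theorem adjOf_cons_pos (t : String × String) (s : List (String × String))
    (ht : (t.2 == "JJ" || t.2 == "JJS" || t.2 == "JJR") = true) :
    adjOf (t :: s) = t.1 :: adjOf s := by
  simp [adjOf, ht]

theorem adjOf_cons_neg (t : String × String) (s : List (String × String))
    (ht : (t.2 == "JJ" || t.2 == "JJS" || t.2 == "JJR") = false) :
    adjOf (t :: s) = adjOf s := by
  simp [adjOf, ht]

-- inner loop, steady phase (w ≥ 1): tmp[h] and bit[i] are the last cells
theorem inner_go (s : List (String × String)) (tmp : List (List String))
    (cur : List String) (bit : List Int) (c : Int) (w : Nat) :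
    s.foldl (cntadjInner tmp.length bit.length) (tmp ++ [cur], bit ++ [c], w + 1)
      = (tmp ++ [cur ++ adjOf s], bit ++ [c + (adjOf s).length], w + 1 + (adjOf s).length) := by
  induction s generalizing cur c w with
  | nil => simp [adjOf]
  | cons t s ih =>
    by_cases ht : (t.2 == "JJ" || t.2 == "JJS" || t.2 == "JJR") = true
    · simp only [List.foldl_cons, cntadjInner, ht, if_pos, Nat.add_one_ne_zero,
        beq_iff_eq, pyModify_append, if_false]
      rw [show (w + 1 + 1 = (w + 1) + 1) from rfl] at *
      rw [ih (cur ++ [t.1]) (c + 1) (w + 1), adjOf_cons_pos t s ht]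
      simp only [Prod.mk.injEq]
      refine ⟨by simp, by push_cast [List.length_cons]; ring, by simp; omega⟩
    · have hf : (t.2 == "JJ" || t.2 == "JJS" || t.2 == "JJR") = false := by simpa using ht
      rw [List.foldl_cons, show cntadjInner tmp.length bit.length (tmp ++ [cur], bit ++ [c], w + 1) t
          = (tmp ++ [cur], bit ++ [c], w + 1) from by
            simp [cntadjInner, hf],
        ih, adjOf_cons_neg t s hf]

-- inner loop from its start state (w = 0)
theorem inner_start (s : List (String × String)) (tmp : List (List String)) (bit : List Int) :
    s.foldl (cntadjInner tmp.length bit.length) (tmp, bit ++ [(0 : Int)], 0)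
      = (if (adjOf s).isEmpty then tmp else tmp ++ [adjOf s],
         bit ++ [((adjOf s).length : Int)], (adjOf s).length) := by
  induction s with
  | nil => simp [adjOf]
  | cons t s ih =>
    by_cases ht : (t.2 == "JJ" || t.2 == "JJS" || t.2 == "JJR") = true
    · rw [List.foldl_cons,
        show cntadjInner tmp.length bit.length (tmp, bit ++ [(0 : Int)], 0) t
          = (tmp ++ [[t.1]], bit ++ [(1 : Int)], 1) from by
            simp [cntadjInner, ht, pyModify_append],
        show (1 : Nat) = 0 + 1 from rfl, inner_go, adjOf_cons_pos t s ht]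
      simp
      omega
    · have hf : (t.2 == "JJ" || t.2 == "JJS" || t.2 == "JJR") = false := by simpa using ht
      rw [List.foldl_cons,
        show cntadjInner tmp.length bit.length (tmp, bit ++ [(0 : Int)], 0) t
          = (tmp, bit ++ [(0 : Int)], 0) from by
            simp [cntadjInner, hf],
        ih, adjOf_cons_neg t s hf]

-- outer loop: h = tmp.length and i = bit.length are loop invariants
theorem outer_go (arr : List (List (String × String))) (tmp : List (List String)) (bit : List Int) :
    (PySem.List.enumerate arr (bit.length : Int)).foldl cntadjOuter (tmp, bit, tmp.length)
      = (tmp ++ (arr.map adjOf).filter (fun a => !a.isEmpty),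
         bit ++ arr.map (fun s => ((adjOf s).length : Int)),
         tmp.length + ((arr.map adjOf).filter (fun a => !a.isEmpty)).length) := by
  induction arr generalizing tmp bit with
  | nil => simp
  | cons s arr ih =>
    rw [PySem.List.enumerate_cons, List.foldl_cons,
      show cntadjOuter (tmp, bit, tmp.length) ((bit.length : Int), s)
        = (if (adjOf s).isEmpty then tmp else tmp ++ [adjOf s],
           bit ++ [((adjOf s).length : Int)],
           if (adjOf s).length ≥ 1 then tmp.length + 1 else tmp.length) from by
        simp only [cntadjOuter, Int.toNat_natCast, inner_start]]
    by_cases he : (adjOf s).isEmpty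
    · have hl : (adjOf s).length = 0 := by simpa [List.isEmpty_iff_length_eq_zero] using he
      rw [if_pos he, if_neg (by omega)]
      have h2 := ih tmp (bit ++ [((adjOf s).length : Int)])
      simp only [List.length_append, List.length_cons, List.length_nil, Nat.zero_add] at h2
      push_cast at h2
      rw [h2]
      simp [he, List.append_assoc]
    · have he' : (adjOf s).isEmpty = false := by simpa using he
      have hl : 1 ≤ (adjOf s).length := by
        rcases hadj : adjOf s with _ | _ <;> simp_all
      rw [if_neg he, if_pos hl]
      have h2 := ih (tmp ++ [adjOf s]) (bit ++ [((adjOf s).length : Int)])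
      simp only [List.length_append, List.length_cons, List.length_nil, Nat.zero_add] at h2
      push_cast at h2
      rw [h2]
      simp [he', List.append_assoc]
      omega

theorem cntadj_eq (arr : List (List (String × String))) :
    cntadj arr = ((arr.map adjOf).filter (fun a => !a.isEmpty),
                  arr.map (fun s => ((adjOf s).length : Int))) := by
  have h := outer_go arr [] []
  simp only [List.length_nil, Int.natCast_zero, List.nil_append, Nat.zero_add] at h
  simp only [cntadj, h]

-- ---------- B-side ----------

-- the (sentence-index, adjective-word) pairs B's dict loop effectively inserts
def pairsOf (arr : List (List (String × String))) (s : Int) : List (Int × String) :=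
  (PySem.List.enumerate arr s).flatMap (fun p => (adjOf p.2).map (fun w => (p.1, w)))

-- the unconditional grouping step on those pairs
def grpStep (g : PySem.Dict Int (List String)) (p : Int × String) : PySem.Dict Int (List String) :=
  g.modify p.1 ([] : List String) (fun v => v ++ [p.2])

-- the guarded loop over all tagged tokens IS the unconditional loop over pairsOf
theorem fold_guard_eq_pairs (arr : List (List (String × String))) (s : Int)
    (g : PySem.Dict Int (List String)) :
    ((PySem.List.enumerate arr s).flatMap (fun p => p.2.map (fun t => (p.1, t)))).foldl
        (fun g it =>
          if it.2.2 == "JJ" || it.2.2 == "JJS" || it.2.2 == "JJR" then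
            g.modify it.1 ([] : List String) (fun v => v ++ [it.2.1])
          else g) g
      = (pairsOf arr s).foldl grpStep g := by
  induction arr generalizing s g with
  | nil => simp [pairsOf]
  | cons x arr ih =>
    rw [PySem.List.enumerate_cons]
    simp only [List.flatMap_cons, List.foldl_append, pairsOf, PySem.List.enumerate_cons] at *
    rw [ih]
    congr 1
    clear ih
    induction x generalizing g with
    | nil => simp [adjOf]
    | cons t x ihx =>
      by_cases ht : (t.2 == "JJ" || t.2 == "JJS" || t.2 == "JJR") = true
      · rw [adjOf_cons_pos t x ht]
        simp only [List.map_cons, List.foldl_cons, ht, if_pos]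
        exact ihx _
      · have hf : (t.2 == "JJ" || t.2 == "JJS" || t.2 == "JJR") = false := by simpa using ht
        rw [adjOf_cons_neg t x hf]
        simp only [List.map_cons, List.foldl_cons, hf, if_false, Bool.false_eq_true]
        exact ihx _

theorem pairsOf_cons (x : List (String × String)) (arr : List (List (String × String))) (s : Int) :
    pairsOf (x :: arr) s = (adjOf x).map (fun w => (s, w)) ++ pairsOf arr (s + 1) := by
  simp [pairsOf, PySem.List.enumerate_cons]

-- every pair's index is ≥ the enumeration start
theorem pairsOf_fst_ge (arr : List (List (String × String))) (s : Int) :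
    ∀ p ∈ pairsOf arr s, s ≤ p.1 := by
  induction arr generalizing s with
  | nil => simp [pairsOf]
  | cons x arr ih =>
    intro p hp
    simp only [pairsOf, PySem.List.enumerate_cons, List.flatMap_cons, List.mem_append] at hp
    rcases hp with hp | hp
    · rcases List.mem_map.1 hp with ⟨w, _, rfl⟩; omega
    · have := ih (s + 1) p hp; omega

-- which words carry index i: exactly sentence i's adjectives
theorem pairsOf_filter_eq (arr : List (List (String × String))) (s i : Int) :
    ((pairsOf arr s).filter (fun p => p.1 == i)).map (fun p => p.2)
      = if s ≤ i ∧ i < s + arr.length then adjOf (arr.getD (i - s).toNat []) else [] := by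
  induction arr generalizing s with
  | nil => simp [pairsOf]
  | cons x arr ih =>
    rw [pairsOf_cons, List.filter_append, List.map_append]
    by_cases hi : i = s
    · subst hi
      have h1 : ((adjOf x).map (fun w => (i, w))).filter (fun p => p.1 == i)
          = (adjOf x).map (fun w => (i, w)) := by
        apply List.filter_eq_self.2; intro p hp
        rcases List.mem_map.1 hp with ⟨w, _, rfl⟩; simp
      have h2 : (pairsOf arr (i + 1)).filter (fun p => p.1 == i) = [] := by
        apply List.filter_eq_nil_iff.2; intro p hp
        have := pairsOf_fst_ge arr (i + 1) p hp
        simp only [beq_iff_eq]; omega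
      rw [h1, h2, if_pos (by refine ⟨le_refl i, ?_⟩; simp)]
      simp [List.map_map]
    · have h1 : ((adjOf x).map (fun w => (s, w))).filter (fun p => p.1 == i) = [] := by
        apply List.filter_eq_nil_iff.2; intro p hp
        rcases List.mem_map.1 hp with ⟨w, _, rfl⟩
        simp only [beq_iff_eq]; omega
      rw [h1]
      simp only [List.map_nil, List.nil_append]
      rw [ih (s + 1)]
      by_cases hc : s + 1 ≤ i ∧ i < s + 1 + arr.length
      · rw [if_pos hc, if_pos (by simp only [List.length_cons]; push_cast; omega)]
        have hidx : (i - s).toNat = (i - (s + 1)).toNat + 1 := by omega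
        rw [hidx, List.getD_cons_succ]
      · rw [if_neg hc, if_neg (by simp only [List.length_cons]; push_cast; omega)]

-- set() of a constant list
theorem ofList_const (l : List String) (s : Int) :
    PySem.Set.ofList (l.map (fun _ => s)) = if l.isEmpty then [] else [s] := by
  induction l with
  | nil => rfl
  | cons w l ih =>
    rw [List.map_cons, PySem.Set.ofList_cons, ih]
    by_cases he : l.isEmpty <;> simp [he, PySem.Set.discard]

-- the keys of B's dict, in order: indices of sentences with at least one adjective
theorem pairsOf_keys (arr : List (List (String × String))) (s : Int) :
    PySem.Set.ofList ((pairsOf arr s).map (fun p => p.1))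
      = ((PySem.List.enumerate arr s).filter (fun p => !(adjOf p.2).isEmpty)).map (fun p => p.1) := by
  induction arr generalizing s with
  | nil => simp [pairsOf]
  | cons x arr ih =>
    rw [pairsOf_cons, List.map_append, PySem.Set.ofList_append, List.map_map]
    have hc : ((adjOf x).map ((fun p => p.1) ∘ (fun w => (s, w)))) = (adjOf x).map (fun _ => s) := rfl
    rw [hc, ofList_const, PySem.List.enumerate_cons, List.filter_cons]
    by_cases he : (adjOf x).isEmpty
    · rw [if_pos he, PySem.Set.update_nil_left, ih]
      simp [he]
    · rw [if_neg he, PySem.Set.update_eq_append_filter, ih]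
      have hf : (((PySem.List.enumerate arr (s + 1)).filter
            (fun p => !(adjOf p.2).isEmpty)).map (fun p => p.1)).filter
            (fun y => !(PySem.Set.contains [s] y)) =
          ((PySem.List.enumerate arr (s + 1)).filter
            (fun p => !(adjOf p.2).isEmpty)).map (fun p => p.1) := by
        apply List.filter_eq_self.2
        intro y hy
        rcases List.mem_map.1 hy with ⟨p, hp, rfl⟩
        have hp' := (List.mem_filter.1 hp).1
        rcases (PySem.List.mem_enumerate_iff _ _ _).1 hp' with ⟨k, hk, rfl⟩
        simp [PySem.Set.contains]
        omega
      rw [hf]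
      simp [he]

-- projecting the filtered enumeration back to sentences
theorem filtered_map_adj (arr : List (List (String × String))) (s : Int) :
    ((PySem.List.enumerate arr s).filter (fun p => !(adjOf p.2).isEmpty)).map (fun p => adjOf p.2)
      = (arr.map adjOf).filter (fun a => !a.isEmpty) := by
  induction arr generalizing s with
  | nil => simp
  | cons x arr ih =>
    rw [PySem.List.enumerate_cons]
    by_cases he : (adjOf x).isEmpty <;> simp [he, ih]

theorem cntadj_alt_eq (arr : List (List (String × String))) :
    cntadj_alt arr = ((arr.map adjOf).filter (fun a => !a.isEmpty),
                      arr.map (fun s => ((adjOf s).length : Int))) := by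
  simp only [cntadj_alt]
  rw [fold_guard_eq_pairs arr 0]
  have hG : ∀ st, (pairsOf arr 0).foldl grpStep st
      = (pairsOf arr 0).foldl
          (fun d p => d.modify p.1 ([] : List String) (fun x => x ++ [p.2])) st := fun _ => rfl
  have hget : ∀ i : Int,
      ((pairsOf arr 0).foldl grpStep PySem.Dict.empty).getD i []
        = if 0 ≤ i ∧ i < (0 : Int) + arr.length then adjOf (arr.getD (i - 0).toNat []) else [] := by
    intro i
    rw [hG, PySem.Dict.getD_foldl_modify_append, PySem.Dict.getD_empty, List.nil_append,
      pairsOf_filter_eq]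
  have hnd : ((pairsOf arr 0).foldl grpStep PySem.Dict.empty).keys.Nodup := by
    rw [hG]
    exact PySem.Dict.nodup_keys_foldl_modify_key (pairsOf arr 0) (fun p => p.1) []
      (fun _ p => fun x => x ++ [p.2]) PySem.Dict.empty PySem.Dict.nodup_keys_empty
  have hkeys : ((pairsOf arr 0).foldl grpStep PySem.Dict.empty).keys
      = ((PySem.List.enumerate arr 0).filter (fun p => !(adjOf p.2).isEmpty)).map (fun p => p.1) := by
    rw [hG, PySem.Dict.keys_foldl_modify_key (pairsOf arr 0) (fun p => p.1) []
      (fun _ p => fun x => x ++ [p.2]) PySem.Dict.empty, PySem.Dict.keys_empty,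
      PySem.Set.update_nil_left, pairsOf_keys]
  simp only [Prod.mk.injEq]
  constructor
  · -- tmp = list(groups.values())
    rw [PySem.Dict.values_eq_map_keys _ hnd [], hkeys, List.map_map]
    rw [List.map_congr_left (g := fun p : Int × List (String × String) => adjOf p.2)
      (by
        intro p hp
        have hp' := (List.mem_filter.1 hp).1
        rcases (PySem.List.mem_enumerate_iff _ _ _).1 hp' with ⟨k, hk, rfl⟩
        simp only [Function.comp_apply, hget]
        rw [if_pos (by constructor <;> [omega; · push_cast; omega])]
        simp [List.getD_eq_getElem?_getD, List.getElem?_eq_getElem hk])]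
    exact filtered_map_adj arr 0
  · -- bit = [len(groups.get(i, [])) for i in range(len(arr))]
    rw [PySem.List.pyRange_zero_nat, List.map_map]
    apply List.ext_getElem (by simp)
    intro k hk1 hk2
    simp only [List.getElem_map, List.getElem_range, Function.comp_apply, hget]
    rw [if_pos (by simp at hk1 ⊢; omega)]
    simp only [List.length_map, List.length_range] at hk1
    simp [List.getD_eq_getElem?_getD, List.getElem?_eq_getElem (by simpa using hk1 : k < arr.length)]



-- ===== VERDICT (by name: the statement is the Claim_ definition above) =====
theorem cntadj_spec : Claim_equal_cntadj := by
  intro arr _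
  show cntadj arr = cntadj_alt arr
  rw [cntadj_eq, cntadj_alt_eq]
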